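-- pv_equiv track=rewrite | github.com/richang12138/paper-code | dataset_utils.py | partition_balance
-- ===== SOURCE A (Python) =====
-- def partition_balance(idxs, num_split):
--     """完全保留第二个代码的均衡分割逻辑，无任何修改"""
--     num_per_part, r = len(idxs) // num_split, len(idxs) % num_split
--     parts = []
--     i, r_used = 0, 0
--
--     while i < len(idxs):
--         if r_used < r:
--             parts.append(idxs[i:(i + num_per_part + 1)])  # 前r个分区多1个样本
--             i += num_per_part + 1
--             r_used += 1
--         else:
--             parts.append(idxs[i:(i + num_per_part)])
--             i += num_per_part
--
--     return parts
-- ===== SOURCE B (Python) =====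
-- def partition_balance(idxs, num_split):
--     """Closed-form balanced partition: part j is idxs[j*q+min(j,r) : (j+1)*q+min(j+1,r)];
--     only min(num_split, len(idxs)) parts exist, so no empty parts are produced."""
--     n = len(idxs)
--     q, r = divmod(n, num_split)
--     k = min(num_split, n)
--     return [idxs[j * q + min(j, r):(j + 1) * q + min(j + 1, r)] for j in range(k)]
-- ===== Notes on version B (the rewrite author's own statement) =====
-- stated objective: idiomatic
-- what changed: Closed-form slice boundaries (divmod + start=j*q+min(j,r)) in one comprehension over min(num_split,len) part indices, replacing A's sequential while-loop walk of the index/remainder state.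
import Mathlib
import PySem

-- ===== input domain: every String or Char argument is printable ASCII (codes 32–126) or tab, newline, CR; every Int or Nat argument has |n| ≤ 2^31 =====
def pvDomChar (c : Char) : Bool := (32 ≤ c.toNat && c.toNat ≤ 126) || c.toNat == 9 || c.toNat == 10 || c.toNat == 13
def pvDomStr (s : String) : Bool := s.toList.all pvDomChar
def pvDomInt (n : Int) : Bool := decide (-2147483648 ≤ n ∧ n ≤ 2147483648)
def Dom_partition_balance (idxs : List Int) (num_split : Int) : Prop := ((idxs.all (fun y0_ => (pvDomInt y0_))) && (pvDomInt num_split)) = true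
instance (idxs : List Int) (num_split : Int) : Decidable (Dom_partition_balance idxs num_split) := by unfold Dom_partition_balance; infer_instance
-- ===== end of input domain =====

-- B replaces A's sequential while-loop index walk by closed-form slice boundaries
-- (start of part j is j*q + min j r), one map over the part indices; same cost.

-- ===== PORT A =====
-- the while loop; fuel (idxs.length + 1) only guards totality, the loop body is A's
def pvLoopA (idxs : List Int) (q r : Int) : Nat → Int → Int → List (List Int) → List (List Int)
  | 0, _, _, parts => parts
  | fuel + 1, i, r_used, parts =>
    if i < (idxs.length : Int) then
      if r_used < r then
        pvLoopA idxs q r fuel (i + q + 1) (r_used + 1)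
          (parts ++ [PySem.List.slice idxs (some i) (some (i + q + 1))])
      else
        pvLoopA idxs q r fuel (i + q) r_used
          (parts ++ [PySem.List.slice idxs (some i) (some (i + q))])
    else parts

def partition_balance (idxs : List Int) (num_split : Int) : List (List Int) :=
  pvLoopA idxs (PySem.Int.floordiv (idxs.length : Int) num_split)
    (PySem.Int.mod (idxs.length : Int) num_split) (idxs.length + 1) 0 0 []

-- ===== PORT B =====
def partition_balance_alt (idxs : List Int) (num_split : Int) : List (List Int) :=
  (PySem.List.pyRange 0 (min num_split (idxs.length : Int)) 1).map (fun j =>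
    PySem.List.slice idxs
      (some (j * PySem.Int.floordiv (idxs.length : Int) num_split
             + min j (PySem.Int.mod (idxs.length : Int) num_split)))
      (some ((j + 1) * PySem.Int.floordiv (idxs.length : Int) num_split
             + min (j + 1) (PySem.Int.mod (idxs.length : Int) num_split))))

-- ===== PRECONDITION & SPEC =====
-- Pre_ excludes exactly the inputs on which Python A does not return: num_split = 0
-- (ZeroDivisionError) and num_split < 0 with a nonempty list (the loop never terminates);
-- with an empty list any nonzero num_split returns.
def Pre_partition_balance (idxs : List Int) (num_split : Int) : Prop :=
  0 < num_split ∨ (idxs = [] ∧ num_split < 0)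
instance (idxs : List Int) (num_split : Int) : Decidable (Pre_partition_balance idxs num_split) := by
  unfold Pre_partition_balance; infer_instance

def pvWitness_partition_balance : List Int × Int := ([1, 2, 3, 4, 5], 2)

def Spec_partition_balance (idxs : List Int) (num_split : Int) (out : List (List Int)) : Prop := out = partition_balance_alt idxs num_split
instance (idxs : List Int) (num_split : Int) (out : List (List Int)) : Decidable (Spec_partition_balance idxs num_split out) := by unfold Spec_partition_balance; infer_instance

-- ===== CLAIM (what is proved, stated in full; the proofs are below) =====
def Claim_equal_partition_balance : Prop := ∀ (idxs : List Int) (num_split : Int), Dom_partition_balance idxs num_split → Pre_partition_balance idxs num_split → Spec_partition_balance idxs num_split (partition_balance idxs num_split)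

-- ===== LEMMAS AND PROOFS =====

-- the closed-form position of the start of part j
def pvPos (q r j : Int) : Int := j * q + min j r

lemma pvPos_succ (q r j : Int) :
    pvPos q r (j + 1) = pvPos q r j + q + (if j < r then 1 else 0) := by
  unfold pvPos
  split_ifs with h
  · have hm : min (j + 1) r = min j r + 1 := by omega
    rw [hm]; ring
  · have hm : min (j + 1) r = min j r := by omega
    rw [hm]; ring

lemma pvPos_mono {q r : Int} (hq : 0 ≤ q) {j j' : Int} (h : j ≤ j') :
    pvPos q r j ≤ pvPos q r j' := by
  unfold pvPos
  have h1 : 0 ≤ (j' - j) * q := mul_nonneg (by omega) hq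
  have h2 : min j r ≤ min j' r := by omega
  nlinarith

-- main loop invariant: from part index j the loop emits exactly the closed-form parts
lemma pvLoopA_eq (idxs : List Int) (q r k : Int)
    (hq : 0 ≤ q)
    (hkn : pvPos q r k = (idxs.length : Int))
    (hstep : ∀ j : Int, 0 ≤ j → j < k → pvPos q r j < pvPos q r (j + 1)) :
    ∀ (fuel : Nat) (j : Int) (parts : List (List Int)),
      0 ≤ j → j ≤ k → (k - j).toNat ≤ fuel →
      pvLoopA idxs q r fuel (pvPos q r j) (min j r) parts
        = parts ++ (PySem.List.pyRange j k 1).map (fun t =>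
            PySem.List.slice idxs (some (t * q + min t r)) (some ((t + 1) * q + min (t + 1) r))) := by
  intro fuel
  induction fuel with
  | zero =>
    intro j parts hj0 hjk hfuel
    have hj : j = k := by omega
    rw [hj, PySem.List.pyRange_one_eq_nil (le_refl k)]
    simp [pvLoopA]
  | succ fuel ih =>
    intro j parts hj0 hjk hfuel
    by_cases hjk' : j < k
    · have hlt : pvPos q r j < (idxs.length : Int) := by
        calc pvPos q r j < pvPos q r (j + 1) := hstep j hj0 hjk'
          _ ≤ pvPos q r k := pvPos_mono hq (by omega)
          _ = _ := hkn
      rw [PySem.List.pyRange_one_cons hjk']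
      by_cases hjr : j < r
      · have hmin : min j r = j := by omega
        have hmin' : min (j + 1) r = min j r + 1 := by omega
        have hnext : pvPos q r j + q + 1 = pvPos q r (j + 1) := by
          rw [pvPos_succ]; simp [hjr]
        have hcond : min j r < r := by omega
        simp only [pvLoopA, if_pos hlt, if_pos hcond]
        rw [hnext, show min j r + 1 = min (j + 1) r from hmin'.symm,
          ih (j + 1) _ (by omega) (by omega) (by omega)]
        simp only [List.map_cons, List.append_assoc, List.singleton_append, pvPos]
      · have hcond : ¬ (min j r < r) := by omega
        have hnext : pvPos q r j + q = pvPos q r (j + 1) := by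
          rw [pvPos_succ]; simp [hjr]
        have hmin' : min (j + 1) r = min j r := by omega
        simp only [pvLoopA, if_pos hlt, if_neg hcond]
        rw [hnext, show min j r = min (j + 1) r from hmin'.symm,
          ih (j + 1) _ (by omega) (by omega) (by omega)]
        simp only [List.map_cons, List.append_assoc, List.singleton_append, pvPos]
    · have hj : j = k := by omega
      have hnl : ¬ (pvPos q r k < (idxs.length : Int)) := by omega
      rw [hj, PySem.List.pyRange_one_eq_nil (le_refl k)]
      simp [pvLoopA, hnl]

-- ===== VERDICT (by name: the statement is the Claim_ definition above) =====
theorem partition_balance_spec : Claim_equal_partition_balance := by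
  intro idxs num_split _ hpre
  unfold Spec_partition_balance partition_balance partition_balance_alt
  rcases hpre with hpos | ⟨hnil, hneg⟩
  · set n : Int := (idxs.length : Int) with hn
    have hn0 : 0 ≤ n := by positivity
    rw [PySem.Int.floordiv_eq_ediv_of_pos hpos, PySem.Int.mod_eq_emod_of_pos hpos]
    set q : Int := n / num_split with hqdef
    set r : Int := n % num_split with hrdef
    have hq : 0 ≤ q := Int.ediv_nonneg hn0 (le_of_lt hpos)
    have hr : 0 ≤ r := Int.emod_nonneg n (by omega)
    have hrs : r < num_split := Int.emod_lt_of_pos n hpos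
    have hdiv : num_split * q + r = n := by
      rw [hqdef, hrdef]; exact Int.ediv_add_emod n num_split
    set k : Int := min num_split n with hkdef
    have hkn : pvPos q r k = n := by
      unfold pvPos
      rcases le_or_gt num_split n with hle | hgt
      · have hk : k = num_split := by omega
        have : min k r = r := by omega
        rw [hk] at this ⊢; rw [this]; linarith [hdiv, mul_comm num_split q]
      · have hq0 : q = 0 := Int.ediv_eq_zero_of_lt hn0 hgt
        have hr0 : r = n := Int.emod_eq_of_lt hn0 hgt
        have hk : k = n := by omega
        rw [hk, hq0, hr0]; omega
    have hstep : ∀ j : Int, 0 ≤ j → j < k → pvPos q r j < pvPos q r (j + 1) := by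
      intro j hj0 hjk
      rw [pvPos_succ]
      rcases eq_or_lt_of_le hq with hq0 | hq1
      · have hgt : n < num_split := by
          by_contra hle
          push_neg at hle
          have : 1 ≤ q := Int.le_ediv_iff_mul_le hpos |>.mpr (by omega)
          omega
        have hr0 : r = n := Int.emod_eq_of_lt hn0 hgt
        have hk : k = n := by omega
        have : j < r := by omega
        simp [this]; omega
      · split_ifs <;> omega
    have key := pvLoopA_eq idxs q r k hq hkn hstep (idxs.length + 1) 0 []
      (le_refl 0) (by omega) (by omega)
    rw [show pvPos q r 0 = 0 by unfold pvPos; omega,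
      show min (0 : Int) r = 0 by omega] at key
    rw [key]; simp
  · subst hnil
    have hk : min num_split (([] : List Int).length : Int) = num_split := by
      simp; omega
    rw [hk, PySem.List.pyRange_one_eq_nil (by omega)]
    simp [pvLoopA]
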